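-- pv_equiv track=rewrite | github.com/rpbaltazar/santa-quizz | exs_sol.py | prop_two
-- ===== SOURCE A (Python) =====
-- def prop_two(inp_str):
--
--     # Greedy return based on the string length
--     if len(inp_str) < 4:
--         return False
--
--     pairs = {inp_str[0:2]:0} # Python's dictionary (HashMap) initialization with the first pair
--     pair_of_letters = False  # Initialization of the pair condition
--     one_in_between = inp_str[0] == inp_str[2] # let's take an advantage :D
--
--     for i in range(1,len(inp_str)-1):
--         # selects the current pair to be analyzed
--         curr_pair = inp_str[i:i+2]
--
--         # if no previous pairs found and if the pair is already seen without overlapping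
--         # (takes sense for loooooong strings, it avoids to check back the whole string every time if needed just checks an hash)
--         if not pair_of_letters and curr_pair in pairs and pairs[curr_pair] != i-1:
--             # then we found it!
--             pair_of_letters = True
--
--         # note we do not use else
--         if not pair_of_letters and curr_pair not in pairs:
--             pairs[curr_pair] = i
--
--         # again short circuited AND
--         if not one_in_between and inp_str[i-1] == inp_str[i+1]:
--             one_in_between = True
--
--     # are both condition evaluated true at the same time? the boolean expression will give the answer! ;)
--     return pair_of_letters and one_in_between
-- ===== SOURCE B (Python) =====
-- def prop_two(inp_str):
--     pairs = [inp_str[i:i + 2] for i in range(len(inp_str) - 1)]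
--     has_pair = any(p in pairs[i + 2:] for i, p in enumerate(pairs))
--     has_sandwich = any(x == y for x, y in zip(inp_str, inp_str[2:]))
--     return has_pair and has_sandwich
-- ===== Notes on version B (the rewrite author's own statement) =====
-- stated objective: idiomatic
-- what changed: Replaces A's single fused loop with a first-occurrence dict and two mutable flags by two independent declarative scans: a pair list checked for a repeat in its own suffix (non-overlap via the i+2 offset), and a zip(s, s[2:]) scan for the sandwich letter; the len<4 guard disappears since no non-overlapping repeated pair fits in fewer than 4 characters.
import Mathlib
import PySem

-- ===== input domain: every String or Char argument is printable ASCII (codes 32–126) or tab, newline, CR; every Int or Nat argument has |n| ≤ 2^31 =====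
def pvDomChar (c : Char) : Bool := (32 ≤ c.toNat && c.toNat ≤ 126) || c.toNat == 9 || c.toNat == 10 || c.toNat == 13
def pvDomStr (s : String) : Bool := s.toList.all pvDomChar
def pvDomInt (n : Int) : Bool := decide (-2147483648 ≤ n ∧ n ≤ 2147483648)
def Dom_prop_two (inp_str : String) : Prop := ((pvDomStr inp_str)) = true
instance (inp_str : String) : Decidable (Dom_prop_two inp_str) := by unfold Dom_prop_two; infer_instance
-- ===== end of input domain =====

-- B replaces A's single-pass dict machinery by two independent scans (a pair list with
-- suffix membership, and a zip for the sandwich rule): simpler/idiomatic, same O(n^2) worst case.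


-- ===== PORT A =====
-- loop body of A's single for-loop (state: pairs dict, pair_of_letters, one_in_between)
def propTwoStep (s : List Char) (st : PySem.Dict (List Char) Int × Bool × Bool) (i : Int) :
    PySem.Dict (List Char) Int × Bool × Bool :=
  let d := st.1
  let p := st.2.1
  let o := st.2.2
  let curr := PySem.List.slice s (some i) (some (i + 2))
  let p' := if !p && d.contains curr && !(d.getD curr 0 == i - 1) then true else p
  let d' := if !p' && !(d.contains curr) then d.insert curr i else d
  let o' := if !o && (PySem.List.pyGetD s (i - 1) ' ' == PySem.List.pyGetD s (i + 1) ' ') then true else o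
  (d', p', o')

def prop_two (inp_str : String) : Bool :=
  let s := inp_str.toList
  if PySem.Str.len inp_str < 4 then false
  else
    let init : PySem.Dict (List Char) Int × Bool × Bool :=
      (PySem.Dict.empty.insert (PySem.List.slice s (some 0) (some 2)) 0, false,
       PySem.List.pyGetD s 0 ' ' == PySem.List.pyGetD s 2 ' ')
    let r := (PySem.List.pyRange 1 (PySem.Str.len inp_str - 1) 1).foldl (propTwoStep s) init
    r.2.1 && r.2.2

-- ===== PORT B =====
def prop_two_alt (inp_str : String) : Bool :=
  let s := inp_str.toList
  let pairs := (PySem.List.pyRange 0 (PySem.Str.len inp_str - 1) 1).map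
      (fun i => PySem.List.slice s (some i) (some (i + 2)))
  let hasPair := (PySem.List.enumerate pairs 0).any
      (fun ip => (PySem.List.slice pairs (some (ip.1 + 2)) none).contains ip.2)
  let hasSandwich := (s.zip (PySem.List.slice s (some 2) none)).any (fun xy => xy.1 == xy.2)
  hasPair && hasSandwich

-- ===== PRECONDITION & SPEC =====
def Spec_prop_two (inp_str : String) (out : Bool) : Prop := out = prop_two_alt inp_str
instance (inp_str : String) (out : Bool) : Decidable (Spec_prop_two inp_str out) := by unfold Spec_prop_two; infer_instance

-- ===== CLAIM (what is proved, stated in full; the proofs are below) =====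
def Claim_equal_prop_two : Prop := ∀ (inp_str : String), Dom_prop_two inp_str → Spec_prop_two inp_str (prop_two inp_str)

-- ===== LEMMAS AND PROOFS =====

def pairAt (s : List Char) (i : Nat) : List Char := (s.drop i).take 2
def firstOcc (s : List Char) : Nat → PySem.Dict (List Char) Int
  | 0 => PySem.Dict.empty.insert (pairAt s 0) 0
  | k + 1 =>
      let d := firstOcc s k
      let q := pairAt s (k + 1)
      if d.contains q then d else d.insert q (k + 1 : Nat)

lemma firstOcc_spec (s : List Char) (k : Nat) (q : List Char) :
    ((firstOcc s k).get? q = none ∧ ∀ m ≤ k, pairAt s m ≠ q) ∨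
    (∃ m ≤ k, (firstOcc s k).get? q = some (m : Int) ∧ pairAt s m = q ∧ ∀ m' < m, pairAt s m' ≠ q) := by
  induction k generalizing q with
  | zero =>
    by_cases hq : pairAt s 0 = q
    · right
      refine ⟨0, le_refl _, ?_, hq, by omega⟩
      simp [firstOcc, hq, PySem.Dict.get?_insert_self]
    · left
      constructor
      · rw [firstOcc, PySem.Dict.get?_insert_of_ne _ _ (fun h => hq h.symm) ]
        exact PySem.Dict.get?_empty q
      · intro m hm; interval_cases m; exact hq
  | succ k ih =>
    by_cases hc : (firstOcc s k).contains (pairAt s (k+1)) = true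
    · have hd : firstOcc s (k+1) = firstOcc s k := by simp [firstOcc, hc]
      rcases ih q with ⟨hn, hall⟩ | ⟨m, hm, hget, hpa, hmin⟩
      · left
        refine ⟨hd ▸ hn, ?_⟩
        intro m hm
        rcases Nat.lt_or_ge m (k+1) with h | h
        · exact hall m (by omega)
        · have hmk : m = k + 1 := by omega
          subst hmk
          intro hq
          rw [PySem.Dict.contains_eq_isSome_get?, hq] at hc
          simp [hn] at hc
      · right; exact ⟨m, by omega, hd ▸ hget, hpa, hmin⟩
    · have hd : firstOcc s (k+1) = (firstOcc s k).insert (pairAt s (k+1)) ((k+1 : Nat) : Int) := by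
        simp [firstOcc, hc]
      have hall_k : ∀ m ≤ k, pairAt s m ≠ pairAt s (k+1) := by
        rcases ih (pairAt s (k+1)) with ⟨hn, hall⟩ | ⟨m, hm, hget, hpa, hmin⟩
        · exact hall
        · rw [PySem.Dict.contains_eq_isSome_get?, hget] at hc; simp at hc
      by_cases hq : pairAt s (k+1) = q
      · right
        refine ⟨k+1, le_refl _, ?_, hq, ?_⟩
        · rw [hd, hq, PySem.Dict.get?_insert_self]
        · intro m' hm' h; exact hall_k m' (by omega) (hq ▸ h)
      · have hget' : (firstOcc s (k+1)).get? q = (firstOcc s k).get? q := by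
          rw [hd, PySem.Dict.get?_insert_of_ne _ _ (fun h => hq h.symm)]
        rcases ih q with ⟨hn, hall⟩ | ⟨m, hm, hget, hpa, hmin⟩
        · left
          refine ⟨hget' ▸ hn, ?_⟩
          intro m hm
          rcases Nat.lt_or_ge m (k+1) with h | h
          · exact hall m (by omega)
          · have : m = k + 1 := by omega
            subst this; exact fun h => hq h
        · right; exact ⟨m, by omega, hget' ▸ hget, hpa, hmin⟩

lemma cond_iff (s : List Char) (k : Nat) :
    ((firstOcc s k).contains (pairAt s (k+1)) &&
      !((firstOcc s k).getD (pairAt s (k+1)) 0 == ((k:Int) + 1) - 1)) = true ↔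
    ∃ t < k, pairAt s t = pairAt s (k+1) := by
  rcases firstOcc_spec s k (pairAt s (k+1)) with ⟨hn, hall⟩ | ⟨m, hm, hget, hpa, hmin⟩
  · have hc : (firstOcc s k).contains (pairAt s (k+1)) = false := by
      rw [PySem.Dict.contains_eq_isSome_get?, hn]; rfl
    simp [hc]
    intro t ht h; exact hall t (by omega) h
  · have hc : (firstOcc s k).contains (pairAt s (k+1)) = true := by
      rw [PySem.Dict.contains_eq_isSome_get?, hget]; rfl
    have hgd : (firstOcc s k).getD (pairAt s (k+1)) 0 = (m : Int) :=
      PySem.Dict.getD_of_get?_eq_some _ 0 hget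
    rw [hc, hgd]
    simp only [Bool.true_and, Bool.not_eq_eq_eq_not, Bool.not_true, beq_eq_false_iff_ne, ne_eq]
    constructor
    · intro hne
      have : m ≠ k := by intro h; apply hne; subst h; omega
      exact ⟨m, by omega, hpa⟩
    · rintro ⟨t, ht, hq⟩ heq
      have hmk : m = k := by
        have : (m : Int) = k := by omega
        exact_mod_cast this
      exact hmin t (by omega) hq

def pFlag (s : List Char) (k : Nat) : Bool :=
  (List.range (k + 1)).any (fun j => (List.range (j - 1)).any (fun t => pairAt s t == pairAt s j))

def oFlag (s : List Char) (k : Nat) : Bool :=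
  (s.getD 0 ' ' == s.getD 2 ' ') || (List.range k).any (fun m => s.getD m ' ' == s.getD (m + 2) ' ')

lemma firstOcc_succ (s : List Char) (k : Nat) :
    firstOcc s (k+1) = if (firstOcc s k).contains (pairAt s (k+1)) then firstOcc s k
      else (firstOcc s k).insert (pairAt s (k+1)) (((k+1 : Nat)) : Int) := rfl

lemma pFlag_succ (s : List Char) (k : Nat) :
    pFlag s (k+1) = (pFlag s k || (List.range k).any (fun t => pairAt s t == pairAt s (k+1))) := by
  unfold pFlag
  rw [List.range_succ (n := k+1), List.any_append]
  simp

lemma oFlag_succ (s : List Char) (k : Nat) :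
    oFlag s (k+1) = (oFlag s k || (s.getD k ' ' == s.getD (k+2) ' ')) := by
  unfold oFlag
  rw [List.range_succ, List.any_append]
  simp [Bool.or_assoc]

lemma slice_pairAt (s : List Char) (k : Nat) :
    PySem.List.slice s (some ((k : Int))) (some ((k : Int) + 2)) = pairAt s k := by
  have : ((k : Int) + 2) = ((k : Int) + ((2 : Nat) : Int)) := by push_cast; ring
  rw [this, PySem.List.slice_natCast_add]
  rfl

lemma aLoop (s : List Char) (k : Nat) :
    let st := (PySem.List.pyRange 1 ((k : Int) + 1) 1).foldl (propTwoStep s)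
      (PySem.Dict.empty.insert (PySem.List.slice s (some 0) (some 2)) 0, false,
       PySem.List.pyGetD s 0 ' ' == PySem.List.pyGetD s 2 ' ')
    st.2.1 = pFlag s k ∧ st.2.2 = oFlag s k ∧ (pFlag s k = false → st.1 = firstOcc s k) := by
  induction k with
  | zero =>
    intro st
    have h0 : PySem.List.pyRange 1 ((0 : Int) + 1) 1 = [] := PySem.List.pyRange_one_eq_nil (by omega)
    refine ⟨?_, ?_, ?_⟩ <;>
      simp only [st, Nat.cast_zero, h0, List.foldl_nil]
    · simp [pFlag]
    · simp only [oFlag, List.range_zero, List.any_nil, Bool.or_false]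
      have g0 := PySem.List.pyGetD_natCast s (0:Nat) ' '
      have g2 := PySem.List.pyGetD_natCast s (2:Nat) ' '
      norm_num at g0 g2
      rw [g0, g2, List.getD_eq_getElem?_getD, List.getD_eq_getElem?_getD]
    · intro _
      have : PySem.List.slice s (some 0) (some 2) = pairAt s 0 := by
        have := slice_pairAt s 0
        simpa using this
      rw [this]; rfl
  | succ k ih =>
    intro st
    have hsplit : PySem.List.pyRange 1 (((k+1 : Nat) : Int) + 1) 1
        = PySem.List.pyRange 1 ((k : Int) + 1) 1 ++ [(k : Int) + 1] := by
      have : (((k+1 : Nat) : Int) + 1) = ((k : Int) + 1) + 1 := by push_cast; ring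
      rw [this, PySem.List.pyRange_one_succ_right (by omega)]
    obtain ⟨hp, ho, hd⟩ := ih
    set stk := (PySem.List.pyRange 1 ((k : Int) + 1) 1).foldl (propTwoStep s)
      (PySem.Dict.empty.insert (PySem.List.slice s (some 0) (some 2)) 0, false,
       PySem.List.pyGetD s 0 ' ' == PySem.List.pyGetD s 2 ' ') with hstk
    have hst : st = propTwoStep s stk ((k : Int) + 1) := by
      simp only [st, hsplit, List.foldl_append, List.foldl_cons, List.foldl_nil, hstk]
    -- normalize the step at i = k+1
    have hcurr : PySem.List.slice s (some ((k : Int) + 1)) (some ((k : Int) + 1 + 2)) = pairAt s (k+1) := by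
      have := slice_pairAt s (k+1)
      push_cast at this
      convert this using 3
    have hg1 : PySem.List.pyGetD s ((k : Int) + 1 - 1) ' ' = s.getD k ' ' := by
      have : ((k : Int) + 1 - 1) = ((k : Nat) : Int) := by ring
      rw [this, PySem.List.pyGetD_natCast]
    have hg2 : PySem.List.pyGetD s ((k : Int) + 1 + 1) ' ' = s.getD (k+2) ' ' := by
      have : ((k : Int) + 1 + 1) = (((k+2 : Nat)) : Int) := by push_cast; ring
      rw [this, PySem.List.pyGetD_natCast]
    rw [hst]
    unfold propTwoStep
    simp only [hcurr, hg1, hg2]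
    set c : Bool := stk.1.contains (pairAt s (k+1)) && !(stk.1.getD (pairAt s (k+1)) 0 == (k : Int) + 1 - 1) with hc
    set cB : Bool := (s.getD k ' ' == s.getD (k+2) ' ') with hcB
    have hoo : ∀ a b : Bool, (if !a && b then true else a) = (a || b) := by decide
    have hoo2 : ∀ a b1 b2 : Bool, (if !a && b1 && b2 then true else a) = (a || (b1 && b2)) := by decide
    have hcval : pFlag s k = false →
        c = (List.range k).any (fun t => pairAt s t == pairAt s (k+1)) := by
      intro hpf
      have hdk := hd hpf
      rw [Bool.eq_iff_iff]
      rw [hc, hdk]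
      rw [cond_iff s k]
      simp [List.any_eq_true, List.mem_range]
    refine ⟨?_, ?_, ?_⟩
    · rw [hoo2, hp, ← hc, pFlag_succ]
      by_cases hpf : pFlag s k = false
      · rw [hpf, hcval hpf]
      · simp at hpf
        rw [hpf]
        simp
    · rw [hoo, ho, oFlag_succ]
    · intro hF
      have hpf : pFlag s k = false := by
        rw [pFlag_succ] at hF
        exact (Bool.or_eq_false_iff.mp hF).1
      have hany : (List.range k).any (fun t => pairAt s t == pairAt s (k+1)) = false := by
        rw [pFlag_succ] at hF
        exact (Bool.or_eq_false_iff.mp hF).2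
      have hcf : (stk.1.contains (pairAt s (k+1)) && !(stk.1.getD (pairAt s (k+1)) 0 == (k:Int) + 1 - 1)) = false := by
        rw [← hc, hcval hpf, hany]
      have hpk : stk.2.1 = false := by rw [hp, hpf]
      rw [hpk]
      simp only [Bool.not_false, Bool.true_and, hcf, Bool.false_eq_true, if_false]
      rw [hd hpf]
      have hcast : ((k : Int) + 1) = (((k+1 : Nat)) : Int) := by push_cast; ring
      rw [firstOcc_succ]
      by_cases hcon : (firstOcc s k).contains (pairAt s (k+1)) = true
      · rw [if_pos hcon]
        simp [hcon]
      · rw [if_neg hcon, ← hcast]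
        have hconf : (firstOcc s k).contains (pairAt s (k+1)) = false := by simpa using hcon
        rw [hconf]
        simp

lemma prop_two_eq (s : String) (h : 4 ≤ s.toList.length) :
    prop_two s = (pFlag s.toList (s.toList.length - 2) && oFlag s.toList (s.toList.length - 2)) := by
  have hne : ¬ ((s.toList.length : Int) < 4) := by omega
  simp only [prop_two, PySem.Str.len_eq]
  rw [if_neg hne]
  have hcast : (s.toList.length : Int) - 1 = ((s.toList.length - 2 : Nat) : Int) + 1 := by omega
  rw [hcast]
  obtain ⟨h1, h2, -⟩ := aLoop s.toList (s.toList.length - 2)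
  rw [h1, h2]

lemma pairsB (cs : List Char) :
    (PySem.List.pyRange 0 ((cs.length : Int) - 1) 1).map (fun i => PySem.List.slice cs (some i) (some (i + 2)))
      = (List.range (cs.length - 1)).map (pairAt cs) := by
  rw [PySem.List.pyRange_one, List.map_map]
  have hlen : (((cs.length : Int) - 1) - 0).toNat = cs.length - 1 := by omega
  rw [hlen]
  apply List.map_congr_left
  intro k hk
  simp only [Function.comp_apply]
  have h0 : ((0 : Int) + (k : Int)) = (k : Int) := by ring
  rw [h0, slice_pairAt]

lemma hasPair_iff (cs : List Char) :
    ((PySem.List.enumerate ((List.range (cs.length - 1)).map (pairAt cs)) 0).any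
      (fun ip => (PySem.List.slice ((List.range (cs.length - 1)).map (pairAt cs)) (some (ip.1 + 2)) none).contains ip.2)) = true
    ↔ ∃ a b : Nat, a + 2 ≤ b ∧ b < cs.length - 1 ∧ pairAt cs a = pairAt cs b := by
  set P := (List.range (cs.length - 1)).map (pairAt cs) with hP
  have hPlen : P.length = cs.length - 1 := by simp [hP]
  have hPel : ∀ (j : Nat) (hj : j < P.length), P[j] = pairAt cs j := by
    intro j hj
    simp [hP]
  rw [List.any_eq_true]
  constructor
  · rintro ⟨ip, hmem, hcond⟩
    rw [PySem.List.mem_enumerate_iff] at hmem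
    obtain ⟨k, hk, rfl⟩ := hmem
    simp only at hcond
    have hsl : PySem.List.slice P (some ((0 : Int) + (k : Nat) + 2)) none = P.drop (k + 2) := by
      have : ((0 : Int) + (k : Nat) + 2) = (((k + 2 : Nat)) : Int) := by push_cast; ring
      rw [this, PySem.List.slice_from_natCast]
    rw [hsl, List.contains_iff_mem, List.mem_iff_getElem] at hcond
    obtain ⟨j, hj, hje⟩ := hcond
    rw [List.getElem_drop] at hje
    have hjP : k + 2 + j < P.length := by
      have := hj; simp only [List.length_drop] at this; omega
    refine ⟨k, k + 2 + j, by omega, by omega, ?_⟩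
    rw [← hPel k (by omega), ← hPel (k + 2 + j) hjP, hje]
  · rintro ⟨a, b, hab, hb, hpa⟩
    refine ⟨((0 : Int) + (a : Nat), P[a]'(by omega)), ?_, ?_⟩
    · rw [PySem.List.mem_enumerate_iff]
      exact ⟨a, by omega, rfl⟩
    · simp only
      have hsl : PySem.List.slice P (some ((0 : Int) + (a : Nat) + 2)) none = P.drop (a + 2) := by
        have : ((0 : Int) + (a : Nat) + 2) = (((a + 2 : Nat)) : Int) := by push_cast; ring
        rw [this, PySem.List.slice_from_natCast]
      rw [hsl, List.contains_iff_mem, List.mem_iff_getElem]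
      refine ⟨b - (a + 2), by simp [List.length_drop]; omega, ?_⟩
      rw [List.getElem_drop]
      have hbe : a + 2 + (b - (a + 2)) = b := by omega
      rw [hPel a (by omega)]
      have : P[a + 2 + (b - (a + 2))]'(by omega) = P[b]'(by omega) := by
        congr 1
      rw [this, hPel b (by omega), hpa]

lemma sand_iff (cs : List Char) :
    ((cs.zip (PySem.List.slice cs (some 2) none)).any (fun xy => xy.1 == xy.2)) = true
    ↔ ∃ m : Nat, m + 2 < cs.length ∧ cs.getD m ' ' = cs.getD (m + 2) ' ' := by
  have hsl : PySem.List.slice cs (some 2) none = cs.drop 2 := by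
    have : ((2 : Int)) = (((2 : Nat)) : Int) := by norm_num
    rw [this, PySem.List.slice_from_natCast]
  rw [hsl, List.any_eq_true]
  constructor
  · rintro ⟨xy, hmem, hcond⟩
    rw [List.mem_iff_getElem] at hmem
    obtain ⟨m, hm, hme⟩ := hmem
    rw [List.getElem_zip] at hme
    have hmlt : m + 2 < cs.length := by
      simp only [List.length_zip, List.length_drop] at hm; omega
    refine ⟨m, hmlt, ?_⟩
    rw [List.getD_eq_getElem _ _ (by omega), List.getD_eq_getElem _ _ (by omega)]
    have h1 : cs[m]'(by omega) = xy.1 := by rw [← hme]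
    have h2 : cs[m + 2]'(by omega) = xy.2 := by
      rw [← hme]
      simp only [List.getElem_drop]
      congr 1
      omega
    rw [h1, h2]
    exact beq_iff_eq.mp hcond
  · rintro ⟨m, hm, hme⟩
    refine ⟨(cs[m]'(by omega), (cs.drop 2)[m]'(by simp [List.length_drop]; omega)), ?_, ?_⟩
    · rw [List.mem_iff_getElem]
      refine ⟨m, by simp [List.length_zip, List.length_drop]; omega, ?_⟩
      rw [List.getElem_zip]
    · simp only [beq_iff_eq, List.getElem_drop]
      rw [List.getD_eq_getElem _ _ (by omega), List.getD_eq_getElem _ _ (by omega)] at hme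
      convert hme using 2
      omega

lemma pFlag_iff (cs : List Char) (k : Nat) :
    pFlag cs k = true ↔ ∃ j ≤ k, ∃ t, t + 2 ≤ j ∧ pairAt cs t = pairAt cs j := by
  unfold pFlag
  simp only [List.any_eq_true, List.mem_range, beq_iff_eq]
  constructor
  · rintro ⟨j, hj, t, ht, hpa⟩
    exact ⟨j, by omega, t, by omega, hpa⟩
  · rintro ⟨j, hj, t, ht, hpa⟩
    exact ⟨j, by omega, t, by omega, hpa⟩

lemma oFlag_iff (cs : List Char) (k : Nat) (hk : 0 < k) :
    oFlag cs k = true ↔ ∃ m < k, cs.getD m ' ' = cs.getD (m + 2) ' ' := by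
  unfold oFlag
  simp only [Bool.or_eq_true, List.any_eq_true, List.mem_range, beq_iff_eq]
  constructor
  · rintro (h | ⟨m, hm, hme⟩)
    · exact ⟨0, by omega, h⟩
    · exact ⟨m, hm, hme⟩
  · rintro ⟨m, hm, hme⟩
    exact Or.inr ⟨m, hm, hme⟩

lemma prop_two_alt_eq (s : String) (h : 4 ≤ s.toList.length) :
    prop_two_alt s = (pFlag s.toList (s.toList.length - 2) && oFlag s.toList (s.toList.length - 2)) := by
  unfold prop_two_alt
  simp only [PySem.Str.len_eq]
  rw [pairsB]
  rw [Bool.eq_iff_iff, Bool.and_eq_true, Bool.and_eq_true]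
  rw [hasPair_iff, sand_iff, pFlag_iff, oFlag_iff _ _ (by omega)]
  constructor
  · rintro ⟨⟨a, b, hab, hb, hpa⟩, ⟨m, hm, hme⟩⟩
    exact ⟨⟨b, by omega, a, hab, hpa⟩, ⟨m, by omega, hme⟩⟩
  · rintro ⟨⟨j, hj, t, ht, hpa⟩, ⟨m, hm, hme⟩⟩
    exact ⟨⟨t, j, ht, by omega, hpa⟩, ⟨m, by omega, hme⟩⟩

lemma prop_two_alt_short (s : String) (h : s.toList.length < 4) : prop_two_alt s = false := by
  unfold prop_two_alt
  simp only [PySem.Str.len_eq]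
  rw [pairsB]
  have hfp : ((PySem.List.enumerate ((List.range (s.toList.length - 1)).map (pairAt s.toList)) 0).any
      (fun ip => (PySem.List.slice ((List.range (s.toList.length - 1)).map (pairAt s.toList)) (some (ip.1 + 2)) none).contains ip.2)) = false := by
    rw [Bool.eq_false_iff]
    intro hc
    rw [hasPair_iff] at hc
    obtain ⟨a, b, hab, hb, -⟩ := hc
    omega
  rw [hfp, Bool.false_and]

-- ===== VERDICT (by name: the statement is the Claim_ definition above) =====
theorem prop_two_spec : Claim_equal_prop_two := by
  intro s _
  unfold Spec_prop_two
  by_cases h : 4 ≤ s.toList.length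
  · rw [prop_two_eq s h, prop_two_alt_eq s h]
  · rw [prop_two_alt_short s (by omega)]
    simp only [prop_two, PySem.Str.len_eq]
    rw [if_pos (by exact_mod_cast by omega : (s.toList.length : Int) < 4)]
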